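-- pv_equiv track=rewrite | github.com/David2CN/30DaysOfCode_may | my_cars_day7.py | my_cars
-- ===== SOURCE A (Python) =====
-- def my_cars(array):
--     """
--     This function takes in an array(cars) and returns the maximum worth of cars you can get.
--     """
--     assert type(array) == list and [i for i in array if type(i) == int], "Error!"
--     x = len(array)
--     if x < 3:
--         return 0
--     cols, rows = x, x
--     worths, mine = [], []
--     for j in range(cols):
--         temp, temp2 = array[j], array[j]
--         temp1, temp3 = [array[j]], [array[j]]
--         a, b = j + 2, j - 1
--         c, d = j + 3, j - 2
--         for k in range(a, rows, 2):
--                 temp += array[k]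
--         for m in range(c, rows, 2):
--                 temp2 += array[m]
--         for l in range(0, b, 2):
--                 temp += array[l]
--         for n in range(0, d, 2):
--                 temp2 += array[n]
--         worths.append(max(temp, temp2))
--
--     temp4 = array[rows - 1] + array[0]
--     for p in range(2, rows-2, 2):
--         temp4 += array[p]
--     worths.append(temp4)
--     return max(worths)
-- ===== SOURCE B (Python) =====
-- def my_cars(array):
--     """
--     Maximum worth of cars, via parity prefix/total sums: O(n) instead of A's O(n^2).
--     """
--     n = len(array)
--     if n < 3:
--         return 0
--     t0 = t1 = 0
--     for j in range(n):
--         if j % 2 == 0: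
--             t0 += array[j]
--         else:
--             t1 += array[j]
--     worths = []
--     p0 = p1 = 0
--     for j in range(n):
--         v = array[j]
--         if j % 2 == 0:
--             temp = t0
--             temp2 = v + (t1 - p1 - (array[j + 1] if j + 1 < n else 0)) \
--                       + (p0 - (array[j - 2] if j >= 2 else 0))
--             p0 += v
--         else:
--             temp = (t1 - p1) + (p0 - array[j - 1])
--             temp2 = v + t0 - array[j - 1] - (array[j + 1] if j + 1 < n else 0)
--             p1 += v
--         worths.append(max(temp, temp2))
--     worths.append(array[n - 1] + t0 - (array[n - 2] if n % 2 == 0 else array[n - 1]))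
--     return max(worths)
-- ===== Notes on version B (the rewrite author's own statement) =====
-- stated objective: faster
-- what changed: A recomputes each stride-2 range sum with nested loops per index (O(n^2)); B makes one pass keeping parity-separated running prefix sums (plus the two parity totals) and derives every temp/temp2 value in O(1), collecting the same worths list.
-- crash fix: On the empty list A's assert raises AssertionError; B returns 0. — e.g. on my_cars([]): A raises AssertionError, B returns 0
import Mathlib
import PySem

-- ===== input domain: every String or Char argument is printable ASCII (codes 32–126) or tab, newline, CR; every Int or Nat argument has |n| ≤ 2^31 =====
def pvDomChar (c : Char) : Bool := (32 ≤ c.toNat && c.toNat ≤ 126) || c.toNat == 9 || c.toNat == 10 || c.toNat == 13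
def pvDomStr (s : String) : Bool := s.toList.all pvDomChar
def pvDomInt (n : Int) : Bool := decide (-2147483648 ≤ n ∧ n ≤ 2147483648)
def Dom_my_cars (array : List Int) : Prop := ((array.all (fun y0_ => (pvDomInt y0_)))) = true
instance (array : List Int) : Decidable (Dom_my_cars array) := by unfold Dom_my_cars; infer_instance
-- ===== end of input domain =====

-- B replaces A's quadratic per-index stride-2 scans by parity-separated prefix/total sums (O(n)); measured faster.

-- ===== PORT A =====
def my_cars (array : List Int) : Int :=
  let x : Int := array.length
  if x < 3 then 0
  else
    let cols := x
    let rows := x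
    let worths : List Int :=
      (PySem.List.pyRange 0 cols 1).foldl (fun worths j =>
        let temp := PySem.List.pyGetD array j 0
        let temp2 := PySem.List.pyGetD array j 0
        let a := j + 2
        let b := j - 1
        let c := j + 3
        let d := j - 2
        let temp := (PySem.List.pyRange a rows 2).foldl (fun temp k => temp + PySem.List.pyGetD array k 0) temp
        let temp2 := (PySem.List.pyRange c rows 2).foldl (fun temp2 m => temp2 + PySem.List.pyGetD array m 0) temp2
        let temp := (PySem.List.pyRange 0 b 2).foldl (fun temp l => temp + PySem.List.pyGetD array l 0) temp
        let temp2 := (PySem.List.pyRange 0 d 2).foldl (fun temp2 nn => temp2 + PySem.List.pyGetD array nn 0) temp2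
        worths ++ [max temp temp2]) []
    let temp4 := PySem.List.pyGetD array (rows - 1) 0 + PySem.List.pyGetD array 0 0
    let temp4 := (PySem.List.pyRange 2 (rows - 2) 2).foldl (fun temp4 p => temp4 + PySem.List.pyGetD array p 0) temp4
    let worths := worths ++ [temp4]
    (PySem.List.max? worths (fun y => y)).getD 0

-- ===== PORT B =====
def my_cars_alt (array : List Int) : Int :=
  let n : Int := array.length
  if n < 3 then 0
  else
    let t := (PySem.List.pyRange 0 n 1).foldl (fun (t : Int × Int) j =>
        if PySem.Int.mod j 2 = 0 then (t.1 + PySem.List.pyGetD array j 0, t.2)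
        else (t.1, t.2 + PySem.List.pyGetD array j 0)) (0, 0)
    let t0 := t.1
    let t1 := t.2
    let st := (PySem.List.pyRange 0 n 1).foldl (fun (s : List Int × Int × Int) j =>
        let worths := s.1
        let p0 := s.2.1
        let p1 := s.2.2
        let v := PySem.List.pyGetD array j 0
        if PySem.Int.mod j 2 = 0 then
          let temp := t0
          let temp2 := v + (t1 - p1 - (if j + 1 < n then PySem.List.pyGetD array (j+1) 0 else 0))
                         + (p0 - (if 2 ≤ j then PySem.List.pyGetD array (j-2) 0 else 0))
          (worths ++ [max temp temp2], p0 + v, p1)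
        else
          let temp := (t1 - p1) + (p0 - PySem.List.pyGetD array (j-1) 0)
          let temp2 := v + t0 - PySem.List.pyGetD array (j-1) 0
                         - (if j + 1 < n then PySem.List.pyGetD array (j+1) 0 else 0)
          (worths ++ [max temp temp2], p0, p1 + v)) ([], 0, 0)
    let worths := st.1 ++ [PySem.List.pyGetD array (n-1) 0 + t0 -
        (if PySem.Int.mod n 2 = 0 then PySem.List.pyGetD array (n-2) 0 else PySem.List.pyGetD array (n-1) 0)]
    (PySem.List.max? worths (fun y => y)).getD 0

-- ===== PRECONDITION & SPEC =====
-- Pre_ excludes only the empty list, on which A's assert raises AssertionError.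
def Pre_my_cars (array : List Int) : Prop := array ≠ []
instance (array : List Int) : Decidable (Pre_my_cars array) := by unfold Pre_my_cars; infer_instance
def pvWitness_my_cars : List Int := [1, 2, 3]

-- A raises AssertionError on the empty list; B returns 0 there.
def Raises_my_cars (array : List Int) : Prop := array = []
instance (array : List Int) : Decidable (Raises_my_cars array) := by unfold Raises_my_cars; infer_instance
def pvRaiseWitness_my_cars : List Int := []
def pvRaiseWitnessOut_my_cars : Int := 0

def Spec_my_cars (array : List Int) (out : Int) : Prop := out = my_cars_alt array
instance (array : List Int) (out : Int) : Decidable (Spec_my_cars array out) := by unfold Spec_my_cars; infer_instance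

-- ===== CLAIM (what is proved, stated in full; the proofs are below) =====
def Claim_equal_my_cars : Prop := ∀ (array : List Int), Dom_my_cars array → Pre_my_cars array → Spec_my_cars array (my_cars array)
def Claim_raises_my_cars : Prop := (∀ (array : List Int), Dom_my_cars array → Raises_my_cars array → ¬ Pre_my_cars array) ∧ (Dom_my_cars (pvRaiseWitness_my_cars) ∧ Raises_my_cars (pvRaiseWitness_my_cars) ∧ my_cars_alt (pvRaiseWitness_my_cars) = pvRaiseWitnessOut_my_cars)

-- ===== LEMMAS AND PROOFS =====

def gsum (xs : List Int) (s b : Nat) : Int :=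
  if s < b then PySem.List.pyGetD xs (s : Int) 0 + gsum xs (s + 2) b else 0
termination_by b - s

lemma gsum_of_ge (xs : List Int) {s b : Nat} (h : b ≤ s) : gsum xs s b = 0 := by
  rw [gsum]; simp [Nat.not_lt.mpr h]

lemma gsum_of_lt (xs : List Int) {s b : Nat} (h : s < b) :
    gsum xs s b = PySem.List.pyGetD xs (s : Int) 0 + gsum xs (s + 2) b := by
  rw [gsum]; simp [h]

lemma gsum_succ_aux (xs : List Int) (fuel : Nat) :
    ∀ s b : Nat, b - s ≤ fuel →
      gsum xs s (b + 1) =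
        gsum xs s b + (if s ≤ b ∧ (b - s) % 2 = 0 then PySem.List.pyGetD xs (b : Int) 0 else 0) := by
  induction fuel with
  | zero =>
    intro s b h
    have hge : b ≤ s := by omega
    rcases Nat.lt_or_ge s (b+1) with h1 | h1
    · have hsb : s = b := by omega
      subst hsb
      rw [gsum_of_lt xs h1, gsum_of_ge xs (Nat.le_refl _), gsum_of_ge xs (by omega)]
      simp
    · rw [gsum_of_ge xs (by omega), gsum_of_ge xs hge,
        if_neg (show ¬ (s ≤ b ∧ (b - s) % 2 = 0) by omega)]
      ring
  | succ fuel ih =>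
    intro s b h
    rcases Nat.lt_or_ge s b with hlt | hge
    · rw [gsum_of_lt xs (show s < b + 1 by omega), gsum_of_lt xs hlt, ih (s+2) b (by omega)]
      by_cases hc : s + 2 ≤ b ∧ (b - (s+2)) % 2 = 0
      · rw [if_pos hc, if_pos (by omega)]; ring
      · rw [if_neg hc, if_neg (by omega)]; ring
    · rcases Nat.lt_or_ge s (b+1) with h1 | h1
      · have hsb : s = b := by omega
        subst hsb
        rw [gsum_of_lt xs h1, gsum_of_ge xs (Nat.le_refl _), gsum_of_ge xs (by omega)]
        simp
      · rw [gsum_of_ge xs (by omega), gsum_of_ge xs hge,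
          if_neg (show ¬ (s ≤ b ∧ (b - s) % 2 = 0) by omega)]
        ring

lemma gsum_succ (xs : List Int) (s b : Nat) :
    gsum xs s (b + 1) =
      gsum xs s b + (if s ≤ b ∧ (b - s) % 2 = 0 then PySem.List.pyGetD xs (b : Int) 0 else 0) :=
  gsum_succ_aux xs (b - s) s b (le_refl _)

lemma gsum_split_aux (xs : List Int) (fuel : Nat) :
    ∀ s m b : Nat, m - s ≤ fuel → s ≤ m → m ≤ b → (m - s) % 2 = 0 →
      gsum xs s b = gsum xs s m + gsum xs m b := by
  induction fuel with
  | zero =>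
    intro s m b h h1 h2 h3
    have : s = m := by omega
    subst this
    rw [gsum_of_ge xs (le_refl s)]; ring
  | succ fuel ih =>
    intro s m b h h1 h2 h3
    rcases Nat.lt_or_ge s m with hlt | hge
    · have hsm2 : s + 2 ≤ m := by omega
      rw [gsum_of_lt xs (show s < b by omega), gsum_of_lt xs hlt,
        ih (s+2) m b (by omega) hsm2 h2 (by omega)]
      ring
    · have : s = m := by omega
      subst this
      rw [gsum_of_ge xs (le_refl s)]; ring

lemma gsum_split (xs : List Int) (s m b : Nat) (h1 : s ≤ m) (h2 : m ≤ b) (h3 : (m - s) % 2 = 0) :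
    gsum xs s b = gsum xs s m + gsum xs m b :=
  gsum_split_aux xs (m - s) s m b (le_refl _) h1 h2 h3

lemma pyRange2_eq_nil {a b : Int} (h : b ≤ a) : PySem.List.pyRange a b 2 = [] := by
  rw [PySem.List.pyRange_of_pos a b (by norm_num)]
  simp [Int.not_lt.mpr h]

lemma pyRange2_cons {a b : Int} (h : a < b) :
    PySem.List.pyRange a b 2 = a :: PySem.List.pyRange (a + 2) b 2 := by
  rw [PySem.List.pyRange_of_pos a b (by norm_num), PySem.List.pyRange_of_pos (a+2) b (by norm_num)]
  have hm : ((b - a + 2 - 1) / 2).toNat = (if a + 2 < b then ((b - (a+2) + 2 - 1) / 2).toNat else 0) + 1 := by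
    split <;> omega
  rw [if_pos h, hm, List.range_succ_eq_map]
  simp only [List.map_cons, List.map_map]
  congr 1
  · simp
  · apply List.map_congr_left
    intro k _
    simp only [Function.comp]
    push_cast
    ring

lemma foldl_pyRange_two_aux (xs : List Int) (fuel : Nat) :
    ∀ (s b c : Int), 0 ≤ s → (b - s).toNat ≤ fuel →
      (PySem.List.pyRange s b 2).foldl (fun acc k => acc + PySem.List.pyGetD xs k 0) c
        = c + gsum xs s.toNat b.toNat := by
  induction fuel with
  | zero =>
    intro s b c hs h
    rw [pyRange2_eq_nil (by omega), gsum_of_ge xs (by omega)]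
    simp
  | succ fuel ih =>
    intro s b c hs h
    rcases lt_or_ge s b with hlt | hge
    · rw [pyRange2_cons hlt]
      simp only [List.foldl_cons]
      rw [ih (s+2) b _ (by omega) (by omega)]
      rw [gsum_of_lt xs (show s.toNat < b.toNat by omega)]
      have h2 : (s + 2).toNat = s.toNat + 2 := by omega
      have h3 : ((s.toNat : Nat) : Int) = s := by omega
      rw [h2, h3]
      ring
    · rw [pyRange2_eq_nil (by omega), gsum_of_ge xs (by omega)]
      simp

lemma foldl_pyRange_two (xs : List Int) (s b c : Int) (hs : 0 ≤ s) :
    (PySem.List.pyRange s b 2).foldl (fun acc k => acc + PySem.List.pyGetD xs k 0) c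
      = c + gsum xs s.toNat b.toNat :=
  foldl_pyRange_two_aux xs (b - s).toNat s b c hs (le_refl _)

def WA (xs : List Int) (k : Nat) : Int :=
  max (PySem.List.pyGetD xs (k:Int) 0 + gsum xs (k+2) xs.length + gsum xs 0 (k-1))
      (PySem.List.pyGetD xs (k:Int) 0 + gsum xs (k+3) xs.length + gsum xs 0 (k-2))

lemma A_fold (xs : List Int) (acc : List Int) (m : Nat) :
    (PySem.List.pyRange 0 (m:Int) 1).foldl (fun worths j =>
        let temp := PySem.List.pyGetD xs j 0
        let temp2 := PySem.List.pyGetD xs j 0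
        let a := j + 2
        let b := j - 1
        let c := j + 3
        let d := j - 2
        let temp := (PySem.List.pyRange a (xs.length : Int) 2).foldl (fun temp k => temp + PySem.List.pyGetD xs k 0) temp
        let temp2 := (PySem.List.pyRange c (xs.length : Int) 2).foldl (fun temp2 m => temp2 + PySem.List.pyGetD xs m 0) temp2
        let temp := (PySem.List.pyRange 0 b 2).foldl (fun temp l => temp + PySem.List.pyGetD xs l 0) temp
        let temp2 := (PySem.List.pyRange 0 d 2).foldl (fun temp2 nn => temp2 + PySem.List.pyGetD xs nn 0) temp2
        worths ++ [max temp temp2]) acc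
      = acc ++ (List.range m).map (WA xs) := by
  induction m with
  | zero => simp [PySem.List.pyRange_one_eq_nil (by omega : (0:Int) ≤ 0)]
  | succ m ih =>
    have hcast : ((m+1 : Nat) : Int) = (m : Int) + 1 := by push_cast; ring
    rw [hcast, PySem.List.pyRange_one_succ_right (by positivity), List.foldl_append, ih]
    simp only [List.foldl_cons, List.foldl_nil, List.range_succ, List.map_append, List.map_cons,
      List.map_nil, List.append_assoc]
    congr 1
    rw [foldl_pyRange_two xs ((m:Int)+2) _ _ (by omega),
        foldl_pyRange_two xs ((m:Int)+3) _ _ (by omega),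
        foldl_pyRange_two xs 0 ((m:Int)-1) _ (by omega),
        foldl_pyRange_two xs 0 ((m:Int)-2) _ (by omega)]
    have e1 : ((m:Int)+2).toNat = m + 2 := by omega
    have e2 : ((m:Int)+3).toNat = m + 3 := by omega
    have e3 : ((m:Int)-1).toNat = m - 1 := by omega
    have e4 : ((m:Int)-2).toNat = m - 2 := by omega
    have e5 : ((xs.length : Int)).toNat = xs.length := by omega
    have e6 : ((0:Int)).toNat = 0 := by omega
    rw [e1, e2, e3, e4, e5, e6]
    simp only [WA]

def WB (xs : List Int) (k : Nat) : Int :=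
  let v := PySem.List.pyGetD xs (k:Int) 0
  if k % 2 = 0 then
    max (gsum xs 0 xs.length)
        (v + (gsum xs 1 xs.length - gsum xs 1 k - (if (k:Int) + 1 < (xs.length:Int) then PySem.List.pyGetD xs ((k:Int)+1) 0 else 0))
           + (gsum xs 0 k - (if 2 ≤ (k:Int) then PySem.List.pyGetD xs ((k:Int)-2) 0 else 0)))
  else
    max ((gsum xs 1 xs.length - gsum xs 1 k) + (gsum xs 0 k - PySem.List.pyGetD xs ((k:Int)-1) 0))
        (v + gsum xs 0 xs.length - PySem.List.pyGetD xs ((k:Int)-1) 0 - (if (k:Int) + 1 < (xs.length:Int) then PySem.List.pyGetD xs ((k:Int)+1) 0 else 0))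

lemma B_t (xs : List Int) (m : Nat) :
    (PySem.List.pyRange 0 (m:Int) 1).foldl (fun (t : Int × Int) j =>
        if PySem.Int.mod j 2 = 0 then (t.1 + PySem.List.pyGetD xs j 0, t.2)
        else (t.1, t.2 + PySem.List.pyGetD xs j 0)) (0, 0)
      = (gsum xs 0 m, gsum xs 1 m) := by
  induction m with
  | zero => simp [PySem.List.pyRange_one_eq_nil (by omega : (0:Int) ≤ 0), gsum_of_ge]
  | succ m ih =>
    have hcast : ((m+1 : Nat) : Int) = (m : Int) + 1 := by push_cast; ring
    rw [hcast, PySem.List.pyRange_one_succ_right (by positivity), List.foldl_append, ih]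
    simp only [List.foldl_cons, List.foldl_nil]
    rw [gsum_succ xs 0 m, gsum_succ xs 1 m]
    have hmod : PySem.Int.mod (m:Int) 2 = ((m % 2 : Nat) : Int) := PySem.Int.mod_natCast m 2
    by_cases hp : m % 2 = 0
    · rw [if_pos (by rw [hmod, hp]; rfl), if_pos (by omega), if_neg (by omega)]
      simp
    · rw [if_neg (by rw [hmod]; omega), if_neg (by omega), if_pos (by omega)]
      simp

lemma B_loop (xs : List Int) (m : Nat) :
    (PySem.List.pyRange 0 (m:Int) 1).foldl (fun (s : List Int × Int × Int) j =>
        let worths := s.1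
        let p0 := s.2.1
        let p1 := s.2.2
        let v := PySem.List.pyGetD xs j 0
        if PySem.Int.mod j 2 = 0 then
          let temp := gsum xs 0 xs.length
          let temp2 := v + (gsum xs 1 xs.length - p1 - (if j + 1 < (xs.length:Int) then PySem.List.pyGetD xs (j+1) 0 else 0))
                         + (p0 - (if 2 ≤ j then PySem.List.pyGetD xs (j-2) 0 else 0))
          (worths ++ [max temp temp2], p0 + v, p1)
        else
          let temp := (gsum xs 1 xs.length - p1) + (p0 - PySem.List.pyGetD xs (j-1) 0)
          let temp2 := v + gsum xs 0 xs.length - PySem.List.pyGetD xs (j-1) 0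
                         - (if j + 1 < (xs.length:Int) then PySem.List.pyGetD xs (j+1) 0 else 0)
          (worths ++ [max temp temp2], p0, p1 + v)) ([], 0, 0)
      = ((List.range m).map (WB xs), gsum xs 0 m, gsum xs 1 m) := by
  induction m with
  | zero => simp [PySem.List.pyRange_one_eq_nil (by omega : (0:Int) ≤ 0), gsum_of_ge]
  | succ m ih =>
    have hcast : ((m+1 : Nat) : Int) = (m : Int) + 1 := by push_cast; ring
    rw [hcast, PySem.List.pyRange_one_succ_right (by positivity), List.foldl_append, ih]
    simp only [List.foldl_cons, List.foldl_nil]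
    rw [List.range_succ, List.map_append, List.map_cons, List.map_nil]
    have hmod : PySem.Int.mod (m:Int) 2 = ((m % 2 : Nat) : Int) := PySem.Int.mod_natCast m 2
    by_cases hp : m % 2 = 0
    · have g0 : gsum xs 0 (m+1) = gsum xs 0 m + PySem.List.pyGetD xs (m:Int) 0 := by
        rw [gsum_succ, if_pos (by omega)]
      have g1 : gsum xs 1 (m+1) = gsum xs 1 m := by
        rw [gsum_succ, if_neg (by omega)]; ring
      rw [g0, g1, if_pos (by rw [hmod, hp]; rfl)]
      simp only [WB, if_pos hp]
    · have g0 : gsum xs 0 (m+1) = gsum xs 0 m := by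
        rw [gsum_succ, if_neg (by omega)]; ring
      have g1 : gsum xs 1 (m+1) = gsum xs 1 m + PySem.List.pyGetD xs (m:Int) 0 := by
        rw [gsum_succ, if_pos (by omega)]
      rw [g0, g1, if_neg (by rw [hmod]; omega)]
      simp only [WB, if_neg hp]

lemma WA_eq_WB (xs : List Int) (k : Nat) (hk : k < xs.length) :
    WA xs k = WB xs k := by
  by_cases hp : k % 2 = 0
  · simp only [WA, WB, if_pos hp]
    have e2 : gsum xs 0 xs.length = gsum xs 0 k + gsum xs k xs.length :=
      gsum_split xs 0 k xs.length (by omega) (by omega) (by omega)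
    have e3 : gsum xs k xs.length = PySem.List.pyGetD xs (k:Int) 0 + gsum xs (k+2) xs.length :=
      gsum_of_lt xs hk
    have e1 : gsum xs 0 (k-1) = gsum xs 0 k := by
      rcases Nat.eq_zero_or_pos k with h0 | h0
      · subst h0; rfl
      · obtain ⟨j, rfl⟩ : ∃ j, k = j + 2 := ⟨k - 2, by omega⟩
        rw [show j + 2 - 1 = j + 1 by omega, gsum_succ xs 0 (j+1), if_neg (by omega)]
        ring
    have f2 : gsum xs 1 (k+1) = gsum xs 1 k := by
      rw [gsum_succ, if_neg (by omega)]; ring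
    have f1 : gsum xs 1 xs.length = gsum xs 1 (k+1) + gsum xs (k+1) xs.length :=
      gsum_split xs 1 (k+1) xs.length (by omega) (by omega) (by omega)
    have f4 : gsum xs 0 k - (if 2 ≤ (k:Int) then PySem.List.pyGetD xs ((k:Int)-2) 0 else 0)
        = gsum xs 0 (k-2) := by
      rcases Nat.eq_zero_or_pos k with h0 | h0
      · subst h0; simp
      · obtain ⟨j, rfl⟩ : ∃ j, k = j + 2 := ⟨k - 2, by omega⟩
        have c2 : ((j:Nat)+2:Int) - 2 = ((j : Nat) : Int) := by ring
        rw [if_pos (by omega), show ((j+2:Nat):Int) = ((j:Nat):Int) + 2 by omega, c2,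
          show j + 2 - 2 = j by omega,
          gsum_succ xs 0 (j+1), if_neg (by omega),
          gsum_succ xs 0 j, if_pos (by omega)]
        ring
    congr 1
    · linarith [e1, e2, e3]
    · by_cases hke : k + 1 < xs.length
      · have g1 : gsum xs (k+1) xs.length
            = PySem.List.pyGetD xs ((k+1:Nat):Int) 0 + gsum xs (k+3) xs.length := by
          rw [gsum_of_lt xs hke, show k+1+2 = k+3 by omega]
        rw [if_pos (show (k:Int)+1 < (xs.length:Int) by omega),
          show (k:Int)+1 = ((k+1:Nat):Int) by omega]
        linarith [f1, f2, f4, g1]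
      · have g1 : gsum xs (k+1) xs.length = 0 := gsum_of_ge xs (by omega)
        have g2 : gsum xs (k+3) xs.length = 0 := gsum_of_ge xs (by omega)
        rw [if_neg (show ¬ ((k:Int)+1 < (xs.length:Int)) by omega)]
        linarith [f1, f2, f4, g1, g2]
  · simp only [WA, WB, if_neg hp]
    obtain ⟨j, rfl⟩ : ∃ j, k = j + 1 := ⟨k - 1, by omega⟩
    have cm1 : ((j+1:Nat):Int) - 1 = ((j : Nat) : Int) := by omega
    have t1 : gsum xs 1 xs.length = gsum xs 1 (j+1) + gsum xs (j+1) xs.length :=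
      gsum_split xs 1 (j+1) xs.length (by omega) (by omega) (by omega)
    have t2 : gsum xs (j+1) xs.length
        = PySem.List.pyGetD xs ((j+1:Nat):Int) 0 + gsum xs (j+3) xs.length := by
      rw [gsum_of_lt xs hk, show j+1+2 = j+3 by omega]
    have t3 : gsum xs 0 (j+1) = gsum xs 0 j + PySem.List.pyGetD xs ((j:Nat):Int) 0 := by
      rw [gsum_succ, if_pos (by omega)]
    have u1 : gsum xs 0 xs.length = gsum xs 0 j + gsum xs j xs.length :=
      gsum_split xs 0 j xs.length (by omega) (by omega) (by omega)
    have u2 : gsum xs j xs.length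
        = PySem.List.pyGetD xs ((j:Nat):Int) 0 + gsum xs (j+2) xs.length := by
      rw [gsum_of_lt xs (by omega)]
    have u4 : gsum xs 0 (j+1-2) = gsum xs 0 j := by
      rcases Nat.eq_zero_or_pos j with h0 | h0
      · subst h0; rfl
      · obtain ⟨i, rfl⟩ : ∃ i, j = i + 1 := ⟨j - 1, by omega⟩
        rw [show i+1+1-2 = i by omega, gsum_succ xs 0 i, if_neg (by omega)]
        ring
    congr 1
    · rw [cm1, show j+1-1 = j by omega, show j+1+2 = j+3 by omega]
      linarith [t1, t2, t3]
    · rw [cm1, show j+1+3 = j+4 by omega]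
      by_cases hke : j + 2 < xs.length
      · have g1 : gsum xs (j+2) xs.length
            = PySem.List.pyGetD xs ((j+2:Nat):Int) 0 + gsum xs (j+4) xs.length := by
          rw [gsum_of_lt xs hke, show j+2+2 = j+4 by omega]
        rw [if_pos (show ((j+1:Nat):Int)+1 < (xs.length:Int) by push_cast; omega),
          show ((j+1:Nat):Int)+1 = ((j+2:Nat):Int) by omega]
        linarith [u1, u2, u4, g1]
      · have g1 : gsum xs (j+2) xs.length = 0 := gsum_of_ge xs (by omega)
        have g2 : gsum xs (j+4) xs.length = 0 := gsum_of_ge xs (by omega)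
        rw [if_neg (show ¬ (((j+1:Nat):Int)+1 < (xs.length:Int)) by push_cast; omega)]
        linarith [u1, u2, u4, g1, g2]

lemma T4 (xs : List Int) (h : 3 ≤ xs.length) :
    PySem.List.pyGetD xs ((xs.length:Int) - 1) 0 + PySem.List.pyGetD xs 0 0 + gsum xs 2 (xs.length - 2)
    = PySem.List.pyGetD xs ((xs.length:Int) - 1) 0 + gsum xs 0 xs.length -
        (if PySem.Int.mod ((xs.length:Int)) 2 = 0 then PySem.List.pyGetD xs ((xs.length:Int) - 2) 0
         else PySem.List.pyGetD xs ((xs.length:Int) - 1) 0) := by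
  have hbase : gsum xs 0 xs.length = PySem.List.pyGetD xs 0 0 + gsum xs 2 xs.length := by
    rw [gsum_of_lt xs (show 0 < xs.length by omega)]
    norm_num
  by_cases hp : xs.length % 2 = 0
  · obtain ⟨j, hj⟩ : ∃ j, xs.length = j + 2 := ⟨xs.length - 2, by omega⟩
    have hj2 : 2 ≤ j := by omega
    have s1 : gsum xs 2 (j+2) = gsum xs 2 (j+1) := by
      rw [gsum_succ xs 2 (j+1), if_neg (by omega)]; ring
    have s2 : gsum xs 2 (j+1) = gsum xs 2 j + PySem.List.pyGetD xs ((j:Nat):Int) 0 := by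
      rw [gsum_succ xs 2 j, if_pos (by omega)]
    have hm2 : PySem.Int.mod ((xs.length:Int)) 2 = ((xs.length % 2 : Nat) : Int) := by
      exact_mod_cast PySem.Int.mod_natCast xs.length 2
    rw [if_pos (by rw [hm2, hp]; rfl),
      show ((xs.length:Int)) - 2 = ((j:Nat):Int) by omega,
      show xs.length - 2 = j by omega, hbase, hj, s1, s2]
    ring
  · obtain ⟨j, hj⟩ : ∃ j, xs.length = j + 1 := ⟨xs.length - 1, by omega⟩
    have hj2 : 2 ≤ j := by omega
    obtain ⟨i, hi⟩ : ∃ i, j = i + 2 := ⟨j - 2, by omega⟩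
    have s1 : gsum xs 2 (j+1) = gsum xs 2 j + PySem.List.pyGetD xs ((j:Nat):Int) 0 := by
      rw [gsum_succ xs 2 j, if_pos (by omega)]
    have s2 : gsum xs 2 j = gsum xs 2 (i+1) := by
      rw [hi, gsum_succ xs 2 (i+1), if_neg (by omega)]; ring
    have hm2 : PySem.Int.mod ((xs.length:Int)) 2 = ((xs.length % 2 : Nat) : Int) := by
      exact_mod_cast PySem.Int.mod_natCast xs.length 2
    rw [if_neg (by rw [hm2]; omega),
      show ((xs.length:Int)) - 1 = ((j:Nat):Int) by omega,
      show xs.length - 2 = i + 1 by omega, hbase, hj, s1, s2]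
    ring

theorem my_cars_spec : Claim_equal_my_cars := by
  intro array _ _
  unfold Spec_my_cars
  by_cases h3 : ((array.length:Int)) < 3
  · simp [my_cars, my_cars_alt, h3]
  · simp only [my_cars, my_cars_alt, if_neg h3]
    rw [B_t array array.length, A_fold array [] array.length, B_loop array array.length]
    rw [foldl_pyRange_two array 2 ((array.length:Int) - 2) _ (by omega)]
    have e1 : ((2:Int)).toNat = 2 := rfl
    have e2 : (((array.length:Int)) - 2).toNat = array.length - 2 := by omega
    rw [e1, e2]
    simp only [List.nil_append]
    have hmap : List.map (WA array) (List.range array.length)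
        = List.map (WB array) (List.range array.length) := by
      apply List.map_congr_left
      intro k hkmem
      exact WA_eq_WB array k (List.mem_range.mp hkmem)
    rw [hmap, T4 array (by omega)]

@[simp] theorem my_cars_raises : Claim_raises_my_cars := by
  unfold Claim_raises_my_cars
  exact ⟨fun a _ hr hp => hp hr, by decide⟩
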